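-- pv_equiv track=rewrite | github.com/JackieMaw/AdventOfCode | python/2023/2023day12b_clever_brute_force.py | apply_to_condition_record
-- ===== SOURCE A (Python) =====
-- def apply_to_condition_record(condition_record, substring):
--
--     full_string = ""
--     substring_index = 0
--     for s in condition_record:
--         if s == "?":
--             full_string += substring[substring_index]
--             substring_index += 1
--         else:
--             full_string += s
--     return full_string
-- ===== SOURCE B (Python) =====
-- def apply_to_condition_record(condition_record, substring):
--     parts = condition_record.split('?')
--     pieces = [parts[0]]
--     for i in range(1, len(parts)):
--         pieces.append(substring[i - 1])
--         pieces.append(parts[i])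
--     return ''.join(pieces)
-- ===== Notes on version B (the rewrite author's own statement) =====
-- stated objective: faster
-- what changed: Replaces the character-by-character loop that grows the result with per-character string += (and an explicit substring index) by one split on '?' followed by an interleaving pass over the segments joined once at the end; the substring position is implicit in the segment index.
import Mathlib
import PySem

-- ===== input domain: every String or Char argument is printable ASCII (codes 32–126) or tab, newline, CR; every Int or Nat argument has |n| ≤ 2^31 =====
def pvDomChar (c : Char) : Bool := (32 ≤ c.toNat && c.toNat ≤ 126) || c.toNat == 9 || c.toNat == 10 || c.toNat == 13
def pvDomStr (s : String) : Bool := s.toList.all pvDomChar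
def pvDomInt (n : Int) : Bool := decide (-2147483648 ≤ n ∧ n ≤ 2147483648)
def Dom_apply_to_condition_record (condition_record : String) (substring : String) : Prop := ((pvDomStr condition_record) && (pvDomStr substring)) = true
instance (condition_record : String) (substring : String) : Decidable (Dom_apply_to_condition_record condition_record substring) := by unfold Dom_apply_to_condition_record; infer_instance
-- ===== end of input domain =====

-- B replaces A's char-by-char loop (per-character string += with an index counter) by
-- split('?') + one interleaving pass joined once at the end; measured faster in a timing run.

-- ===== PORT A =====
def apply_to_condition_record (condition_record : String) (substring : String) : String :=
  let r := condition_record.toList.foldl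
    (fun (st : List Char × Int) s =>
      if s == '?' then
        (st.1 ++ [(PySem.List.pyGet? substring.toList st.2).getD '!'], st.2 + 1)
      else
        (st.1 ++ [s], st.2))
    ([], 0)
  String.ofList r.1

-- ===== PORT B =====
def apply_to_condition_record_alt (condition_record : String) (substring : String) : String :=
  let parts := PySem.Chars.splitOn condition_record.toList ['?']
  let pieces := (PySem.List.pyRange 1 (parts.length : Int) 1).foldl
    (fun (pieces : List (List Char)) i =>
      (pieces ++ [[(PySem.List.pyGet? substring.toList (i - 1)).getD '!']])
        ++ [PySem.List.pyGetD parts i []])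
    [PySem.List.pyGetD parts 0 []]
  String.ofList (PySem.Chars.join [] pieces)

-- ===== PRECONDITION & SPEC =====
-- Pre_ excludes exactly the inputs where condition_record has more '?' than substring has
-- characters: there Python A (and Python B) raise IndexError.
def Pre_apply_to_condition_record (condition_record : String) (substring : String) : Prop :=
  PySem.Str.count condition_record "?" ≤ PySem.Str.len substring
instance (condition_record : String) (substring : String) : Decidable (Pre_apply_to_condition_record condition_record substring) := by unfold Pre_apply_to_condition_record; infer_instance

def pvWitness_apply_to_condition_record : String × String := ("a?b?c", "xy")

def Spec_apply_to_condition_record (condition_record : String) (substring : String) (out : String) : Prop := out = apply_to_condition_record_alt condition_record substring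
instance (condition_record : String) (substring : String) (out : String) : Decidable (Spec_apply_to_condition_record condition_record substring out) := by unfold Spec_apply_to_condition_record; infer_instance

-- ===== CLAIM (what is proved, stated in full; the proofs are below) =====
def Claim_equal_apply_to_condition_record : Prop := ∀ (condition_record : String) (substring : String), Dom_apply_to_condition_record condition_record substring → Pre_apply_to_condition_record condition_record substring → Spec_apply_to_condition_record condition_record substring (apply_to_condition_record condition_record substring)

-- ===== LEMMAS AND PROOFS =====

-- the character A/B read at substring index i (same default on both sides)
def pvSget (sub : List Char) (i : Int) : Char :=
  (PySem.List.pyGet? sub i).getD '!'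

-- the intended result, char by char: g l i fills '?'s from substring position i on
def pvFill (sub : List Char) : List Char → Int → List Char
  | [], _ => []
  | c :: t, i => if c == '?' then pvSget sub i :: pvFill sub t (i + 1) else c :: pvFill sub t i

-- reference split on '?' with an accumulated current segment (matches splitOn.go)
def pvSplit (pre : List Char) : List Char → List (List Char)
  | [] => [pre]
  | c :: t => if c == '?' then pre :: pvSplit [] t else pvSplit (pre ++ [c]) t

-- the pieces B's loop appends for the tail segments, starting at substring position i
def pvPieces (sub : List Char) : List (List Char) → Int → List (List Char)
  | [], _ => []
  | q :: r, i => [pvSget sub i] :: q :: pvPieces sub r (i + 1)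

theorem pvSplit_ne_nil (l : List Char) (pre : List Char) : pvSplit pre l ≠ [] := by
  induction l generalizing pre with
  | nil => simp [pvSplit]
  | cons c t ih =>
    simp only [pvSplit]
    split
    · simp
    · exact ih _

theorem pvFoldA_eq (sub : List Char) (l : List Char) (acc : List Char) (i : Int) :
    l.foldl (fun (st : List Char × Int) s =>
        if s == '?' then (st.1 ++ [(PySem.List.pyGet? sub st.2).getD '!'], st.2 + 1)
        else (st.1 ++ [s], st.2)) (acc, i)
      = (acc ++ pvFill sub l i, i + (l.countP (fun c => c == '?') : Int)) := by
  induction l generalizing acc i with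
  | nil => simp [pvFill]
  | cons c t ih =>
    rw [List.foldl_cons]
    by_cases h : c = '?'
    · subst h
      simp only [beq_self_eq_true, if_pos]
      rw [ih]
      refine Prod.ext ?_ ?_
      · simp [pvFill, pvSget]
      · simp
        omega
    · have hb : (c == '?') = false := by simp [h]
      rw [hb]
      simp only [Bool.false_eq_true, if_false]
      rw [ih]
      refine Prod.ext ?_ ?_
      · simp [pvFill, hb]
      · simp [hb]

theorem pvGo_eq (fuel : ℕ) (l cur : List Char) (aacc : List (List Char))
    (h : l.length < fuel) :
    PySem.Chars.splitOn.go ['?'] fuel l cur aacc = aacc.reverse ++ pvSplit cur.reverse l := by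
  induction fuel generalizing l cur aacc with
  | zero => omega
  | succ fuel ih =>
    cases l with
    | nil => simp [PySem.Chars.splitOn.go, pvSplit]
    | cons c t =>
      have ht : t.length < fuel := by
        simp only [List.length_cons] at h
        omega
      by_cases hc : c = '?'
      · subst hc
        have hstep : PySem.Chars.splitOn.go ['?'] (fuel + 1) ('?' :: t) cur aacc
            = PySem.Chars.splitOn.go ['?'] fuel t [] (cur.reverse :: aacc) := by
          simp [PySem.Chars.splitOn.go, List.isPrefixOf]
        rw [hstep, ih t [] (cur.reverse :: aacc) ht]
        simp [pvSplit]
      · have hcc : ¬ ('?' = c) := fun hx => hc hx.symm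
        have hstep : PySem.Chars.splitOn.go ['?'] (fuel + 1) (c :: t) cur aacc
            = PySem.Chars.splitOn.go ['?'] fuel t (c :: cur) aacc := by
          simp [PySem.Chars.splitOn.go, List.isPrefixOf, hcc]
        rw [hstep, ih t (c :: cur) aacc ht]
        simp [pvSplit, hc]

theorem pvSplitOn_eq (l : List Char) :
    PySem.Chars.splitOn l ['?'] = pvSplit [] l := by
  have := pvGo_eq (l.length + 1) l [] [] (by omega)
  simpa [PySem.Chars.splitOn] using this

theorem pvJoin_eq_flatten (xs : List (List Char)) :
    PySem.Chars.join [] xs = xs.flatten := by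
  induction xs with
  | nil => simp [PySem.Chars.join, List.intercalate]
  | cons p rest ih =>
    cases rest with
    | nil => simp [PySem.Chars.join, List.intercalate, List.intersperse]
    | cons q r =>
      rw [PySem.Chars.join_cons_cons, ih]
      simp

theorem pvSplit_fill (sub l : List Char) (pre : List Char) (i : Int) :
    (match pvSplit pre l with
      | [] => []
      | p :: r => p ++ (pvPieces sub r i).flatten)
      = pre ++ pvFill sub l i := by
  induction l generalizing pre i with
  | nil => simp [pvSplit, pvFill, pvPieces]
  | cons c t ih =>
    by_cases h : c = '?'
    · subst h
      rw [show pvSplit pre ('?' :: t) = pre :: pvSplit [] t by simp [pvSplit]]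
      rw [show pvFill sub ('?' :: t) i = pvSget sub i :: pvFill sub t (i + 1) by
        simp [pvFill]]
      rcases hms : pvSplit ([] : List Char) t with _ | ⟨p, r⟩
      · exact absurd hms (pvSplit_ne_nil t [])
      · have hih := ih ([] : List Char) (i + 1)
        rw [hms] at hih
        simp only [List.nil_append] at hih
        simp [pvPieces, hih]
    · have hb : (c == '?') = false := by simp [h]
      rw [show pvSplit pre (c :: t) = pvSplit (pre ++ [c]) t by simp [pvSplit, h]]
      rw [show pvFill sub (c :: t) i = c :: pvFill sub t i by simp [pvFill, hb]]
      have hih := ih (pre ++ [c]) i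
      rcases hms : pvSplit (pre ++ [c]) t with _ | ⟨p, r⟩
      · exact absurd hms (pvSplit_ne_nil t (pre ++ [c]))
      · rw [hms] at hih
        simpa using hih

theorem pvFoldB_eq (sub : List Char) (parts : List (List Char)) (r : List (List Char))
    (k : ℕ) (init : List (List Char)) (hk : 1 ≤ k) (hd : parts.drop k = r) :
    (PySem.List.pyRange (k : Int) (parts.length : Int) 1).foldl
        (fun (pieces : List (List Char)) i =>
          (pieces ++ [[(PySem.List.pyGet? sub (i - 1)).getD '!']])
            ++ [PySem.List.pyGetD parts i []])
        init
      = init ++ pvPieces sub r ((k : Int) - 1) := by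
  induction r generalizing k init with
  | nil =>
    have hlen : parts.length ≤ k := List.drop_eq_nil_iff.mp hd
    rw [PySem.List.pyRange_one_eq_nil (by exact_mod_cast hlen)]
    simp [pvPieces]
  | cons q rest ih =>
    have hk' : k < parts.length := by
      by_contra hge
      rw [List.drop_eq_nil_iff.mpr (by omega)] at hd
      simp at hd
    rw [PySem.List.pyRange_one_cons (by exact_mod_cast hk')]
    rw [List.foldl_cons]
    have hq : parts[k]? = some q := by
      have h2 : (parts.drop k)[0]? = parts[k+0]? := List.getElem?_drop
      simp [hd] at h2
      exact h2.symm
    have hget : PySem.List.pyGetD parts (k : Int) [] = q := by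
      rw [PySem.List.pyGetD_natCast]
      simp [List.getD, hq]
    have hdrop : parts.drop (k + 1) = rest := by
      rw [← List.tail_drop, hd]
      rfl
    have hih := ih (k + 1) ((init ++ [[(PySem.List.pyGet? sub ((k : Int) - 1)).getD '!']]) ++ [q])
      (by omega) hdrop
    rw [show ((k + 1 : ℕ) : Int) = (k : Int) + 1 by push_cast; ring] at hih
    rw [hget]
    simp only [add_sub_cancel_right] at hih
    rw [hih]
    have : ((k : Int) - 1) + 1 = (k : Int) := by ring
    rw [show pvPieces sub (q :: rest) ((k : Int) - 1)
        = [pvSget sub ((k : Int) - 1)] :: q :: pvPieces sub rest (((k : Int) - 1) + 1) by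
      simp [pvPieces]]
    rw [this]
    simp [pvSget]

-- ===== VERDICT (by name: the statement is the Claim_ definition above) =====
theorem apply_to_condition_record_spec : Claim_equal_apply_to_condition_record := by
  intro condition_record substring _ _
  unfold Spec_apply_to_condition_record
  unfold apply_to_condition_record apply_to_condition_record_alt
  simp only []
  congr 1
  rw [pvFoldA_eq substring.toList condition_record.toList [] 0]
  simp only [List.nil_append]
  rw [pvSplitOn_eq]
  rcases hms : pvSplit ([] : List Char) condition_record.toList with _ | ⟨p, r⟩
  · exact absurd hms (pvSplit_ne_nil condition_record.toList [])
  · have h0 : PySem.List.pyGetD (p :: r) (0 : Int) [] = p := by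
      simp [PySem.List.pyGetD]
    rw [h0]
    have hB := pvFoldB_eq substring.toList (p :: r) r 1 [p] (le_refl 1) (by simp)
    simp only [Nat.cast_one] at hB
    rw [hB]
    rw [pvJoin_eq_flatten]
    have hfill := pvSplit_fill substring.toList condition_record.toList [] 0
    rw [hms] at hfill
    simp only [List.nil_append] at hfill
    rw [← hfill]
    norm_num
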